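-- pv_equiv track=rewrite | github.com/hyg4779/algo_selfstudy | programmers/winter_intern/s1.py | solution
-- ===== SOURCE A (Python) =====
-- def solution(line):
--     answer = []
--     n = len(line)
--
--     i = 0
--     stack = ''
--     flag = False
--     while i < n:
--
--         # 이전 문자가 있을때
--         if stack:
--
--             # 이전 문자가 있다면 *표 표기 True
--             if stack[-1] == line[i]:
--                 flag =True
--
--             # 다르다면
--             else:
--                 # *표 표기 True면 *표도 같으 append
--                 answer.append(stack)
--                 if flag:
--                     answer.append('*')
--                     flag = False
--                 stack = line[i]
--
--         # 이전 문자가 없다면 이전 문자 갱신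
--         else:
--             stack = line[i]
--
--         i += 1
--
--     if stack:
--         answer.append(stack)
--         if flag:
--             answer.append('*')
--
--     return answer
-- ===== SOURCE B (Python) =====
-- def solution(line):
--     answer = []
--     i, n = 0, len(line)
--     while i < n:
--         j = i
--         while j < n and line[j] == line[i]:
--             j += 1
--         answer.append(line[i])
--         if j - i > 1:
--             answer.append('*')
--         i = j
--     return answer
-- ===== Notes on version B (the rewrite author's own statement) =====
-- stated objective: alternative
-- what changed: Replaced A's char-by-char state machine (pending char + repeat flag carried across iterations) with a two-pointer run scanner that consumes each maximal run at once and emits its char plus an optional star marker.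
import Mathlib
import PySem

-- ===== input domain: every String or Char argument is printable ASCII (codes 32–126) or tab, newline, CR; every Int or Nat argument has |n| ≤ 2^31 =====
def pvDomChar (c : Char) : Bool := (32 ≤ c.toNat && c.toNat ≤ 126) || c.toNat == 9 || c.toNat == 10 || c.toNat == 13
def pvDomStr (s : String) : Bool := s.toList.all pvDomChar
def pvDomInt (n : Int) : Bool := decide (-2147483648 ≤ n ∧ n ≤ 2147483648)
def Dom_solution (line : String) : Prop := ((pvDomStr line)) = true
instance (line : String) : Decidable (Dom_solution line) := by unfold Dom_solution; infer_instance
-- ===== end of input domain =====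

-- B replaces A's one-char-at-a-time state machine by a run scanner consuming each maximal run at once (alternative decomposition, same cost).

-- ===== PORT A =====
-- A's while loop over indices, transliterated as recursion over the character list;
-- Python's stack string (always '' or one char) is Option Char, stack[-1] is that char.
def solLoopA (l : List Char) (answer : List String) (stack : Option Char) (flag : Bool) : List String :=
  match l with
  | [] =>
    match stack with
    | some s => (answer ++ [String.mk [s]]) ++ (if flag then ["*"] else [])
    | none => answer
  | c :: rest =>
    match stack with
    | some s =>
      if s == c then solLoopA rest answer (some s) true
      else solLoopA rest ((answer ++ [String.mk [s]]) ++ (if flag then ["*"] else [])) (some c) false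
    | none => solLoopA rest answer (some c) flag

def solution (line : String) : List String := solLoopA line.toList [] none false

-- ===== PORT B =====
-- B's inner while loop advances j over the run: ported as takeWhile length, then drop.
def altGo (l : List Char) : List String :=
  match l with
  | [] => []
  | c :: rest =>
    let k := (rest.takeWhile (· == c)).length
    String.mk [c] :: ((if k + 1 > 1 then ["*"] else []) ++ altGo (rest.drop k))
termination_by l.length
decreasing_by simp [List.length_drop]

def solution_alt (line : String) : List String := altGo line.toList

-- ===== PRECONDITION & SPEC =====
def Spec_solution (line : String) (out : List String) : Prop := out = solution_alt line
instance (line : String) (out : List String) : Decidable (Spec_solution line out) := by unfold Spec_solution; infer_instance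

-- ===== CLAIM (what is proved, stated in full; the proofs are below) =====
def Claim_equal_solution : Prop := ∀ (line : String), Dom_solution line → Spec_solution line (solution line)

-- ===== LEMMAS AND PROOFS =====
lemma solLoopA_some (l : List Char) (c : Char) (f : Bool) (ans : List String) :
    solLoopA l ans (some c) f =
      ans ++ String.mk [c] ::
        ((if f = true ∨ 0 < (l.takeWhile (· == c)).length then ["*"] else []) ++
          altGo (l.drop (l.takeWhile (· == c)).length)) := by
  induction l generalizing c f ans with
  | nil =>
    cases f <;> simp [solLoopA, altGo]
  | cons d rest ih =>
    by_cases h : d = c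
    · subst h
      simp only [solLoopA, beq_self_eq_true, if_true, ih]
      simp [List.takeWhile]
    · have hb : (d == c) = false := by simp [h]
      have hb' : (c == d) = false := by simp [Ne.symm h]
      simp only [solLoopA, hb', Bool.false_eq_true, if_false, ih]
      rw [show List.takeWhile (· == c) (d :: rest) = [] by simp [List.takeWhile, hb]]
      simp only [List.length_nil, List.drop_zero, altGo]
      cases f <;> simp

theorem solution_eq_alt (line : String) : solution line = solution_alt line := by
  unfold solution solution_alt
  cases h : line.toList with
  | nil => simp [solLoopA, altGo]
  | cons c rest =>
    simp only [solLoopA, solLoopA_some, altGo]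
    simp

-- ===== VERDICT (by name: the statement is the Claim_ definition above) =====
theorem solution_spec : Claim_equal_solution := by
  intro line _
  exact solution_eq_alt line
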